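-- pv_equiv track=rewrite | github.com/danielbackhouse/MotionWare-Streamline | Version 4/noSleepDiarySleepWindow.py | find_start_point
-- ===== SOURCE A (Python) =====
-- def find_start_point(activity, study_period, start_threshold):
--     """ Finds the point at which to start determining sleep points given an
--     activity array that is larger than the length of the study.
--
--     :param (array) activity: the activity counts for the participant
--     :param (int) start_threshold: the threshold value for the number
--         of zeros allowed within an hour recording. Value used to determine
--         when the actual recording for the motionwatch started given data
--         that exceeds the length of the study
--     :param (int) study_period: the number of days they wore the motionwatch
--     :return: returns the index at which to start the calculation
--     :rtype: (int)
--     """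
--     # The number of epochs in total neccesary for the requiried study length
--     required_epoch_range = study_period*24*60
--     # one hour is 60 epochs for one minute epoch length
--     hour = 60
--     start_index = 0
--     for epoch_num in range(0, len(activity)):
--         # check to see if we are exceeding the range of activity
--         if (required_epoch_range + epoch_num >= len(activity)):
--             break
--
--         hour_range = activity[epoch_num:epoch_num+hour]
--         num_zeros = count_zeros_in_array(hour_range)
--
--         if(num_zeros < start_threshold):
--            start_index = epoch_num
--
--     return start_index # if no clear cut start was found it's just going to use the begining of the activity
--
-- def count_zeros_in_array(arr):
--     """ Counts the number of zeros in an array with integer values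
--
--     :param (array) arr: an array of int's
--     :return: The number of zeros in the array
--     :rtype: (int)
--     """
--     zero_counter = 0;
--     for num in  arr:
--         if(num == 0):
--             zero_counter = zero_counter + 1
--
--     return zero_counter
-- ===== SOURCE B (Python) =====
-- def find_start_point(activity, study_period, start_threshold):
--     """Prefix-sum of zeros over just the part of the data the windows can touch,
--     then a single backward scan with early return: the answer is the LAST window
--     start whose hour window has fewer than start_threshold zeros, so scanning
--     from the end returns at the first hit."""
--     n = len(activity)
--     limit = min(n, n - study_period * 24 * 60)
--     # only windows starting before `limit` exist; they reach at most index limit+58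
--     m = max(0, min(limit + 59, n))
--     # prefix[i] = number of zeros among the first i activity values (i <= m)
--     prefix = [0]
--     for x in activity[:m]:
--         prefix.append(prefix[-1] + (1 if x == 0 else 0))
--     for e in range(limit - 1, -1, -1):
--         if prefix[min(e + 60, m)] - prefix[e] < start_threshold:
--             return e
--     return 0
-- ===== Notes on version B (the rewrite author's own statement) =====
-- stated objective: alternative
-- what changed: Replaces the per-index rescan of each 60-epoch window (slice + zero count) by a prefix-sum of zeros over the reachable part of the data and a single backward scan that returns at the first (= last) qualifying window start.
import Mathlib
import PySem

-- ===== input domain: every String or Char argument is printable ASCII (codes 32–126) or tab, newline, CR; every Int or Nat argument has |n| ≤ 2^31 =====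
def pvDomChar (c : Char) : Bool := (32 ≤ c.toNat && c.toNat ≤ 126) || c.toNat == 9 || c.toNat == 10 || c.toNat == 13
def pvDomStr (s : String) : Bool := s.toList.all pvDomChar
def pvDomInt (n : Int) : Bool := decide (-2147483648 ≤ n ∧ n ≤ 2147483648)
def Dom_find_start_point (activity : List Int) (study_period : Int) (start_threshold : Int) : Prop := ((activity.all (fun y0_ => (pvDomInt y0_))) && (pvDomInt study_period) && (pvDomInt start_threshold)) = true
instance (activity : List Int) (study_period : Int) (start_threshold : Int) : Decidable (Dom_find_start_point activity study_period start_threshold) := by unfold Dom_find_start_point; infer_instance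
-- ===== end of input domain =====

-- B replaces A's per-index rescan of each 60-epoch window by a prefix-sum of zeros
-- and a single backward scan returning at the first (= last) qualifying start (objective: alternative).

-- ===== PORT A =====
def count_zeros_in_array (arr : List Int) : Int :=
  arr.foldl (fun zero_counter num => if num == 0 then zero_counter + 1 else zero_counter) 0

-- the `for epoch_num in range(...)` loop with its `break` and `start_index` accumulator
def fspLoopA (activity : List Int) (required : Int) (thr : Int) : List Int → Int → Int
  | [], start_index => start_index
  | epoch_num :: rest, start_index =>
    if required + epoch_num ≥ (activity.length : Int) then start_index
    else
      let hour_range := PySem.List.slice activity (some epoch_num) (some (epoch_num + 60))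
      let num_zeros := count_zeros_in_array hour_range
      fspLoopA activity required thr rest (if num_zeros < thr then epoch_num else start_index)

def find_start_point (activity : List Int) (study_period : Int) (start_threshold : Int) : Int :=
  fspLoopA activity (study_period * 24 * 60) start_threshold
    (PySem.List.pyRange 0 (activity.length : Int) 1) 0

-- ===== PORT B =====
-- the prefix-building loop: fspPrefix acc xs = [acc, acc+z(1), …, acc+z(all)]
def fspPrefix (acc : Int) : List Int → List Int
  | [] => [acc]
  | x :: xs => acc :: fspPrefix (acc + (if x == 0 then 1 else 0)) xs

-- the backward `for e in range(limit-1, -1, -1)` loop with its early return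
def fspLoopB (pre : List Int) (m : Int) (thr : Int) : List Int → Int
  | [] => 0
  | e :: rest =>
    if PySem.List.pyGetD pre (min (e + 60) m) 0 - PySem.List.pyGetD pre e 0 < thr then e
    else fspLoopB pre m thr rest

def find_start_point_alt (activity : List Int) (study_period : Int) (start_threshold : Int) : Int :=
  let n : Int := (activity.length : Int)
  let limit : Int := min n (n - study_period * 24 * 60)
  let m : Int := max 0 (min (limit + 59) n)
  fspLoopB (fspPrefix 0 (PySem.List.slice activity none (some m))) m start_threshold
    (PySem.List.pyRange (limit - 1) (-1) (-1))

-- ===== PRECONDITION & SPEC =====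
def Spec_find_start_point (activity : List Int) (study_period : Int) (start_threshold : Int) (out : Int) : Prop := out = find_start_point_alt activity study_period start_threshold
instance (activity : List Int) (study_period : Int) (start_threshold : Int) (out : Int) : Decidable (Spec_find_start_point activity study_period start_threshold out) := by unfold Spec_find_start_point; infer_instance

-- ===== CLAIM (what is proved, stated in full; the proofs are below) =====
def Claim_equal_find_start_point : Prop := ∀ (activity : List Int) (study_period : Int) (start_threshold : Int), Dom_find_start_point activity study_period start_threshold → Spec_find_start_point activity study_period start_threshold (find_start_point activity study_period start_threshold)

-- ===== LEMMAS AND PROOFS =====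

-- number of zeros, as a Nat count
def zc (xs : List Int) : Nat := xs.countP (fun x => x == 0)

lemma czia_eq (xs : List Int) : count_zeros_in_array xs = (zc xs : Int) := by
  simpa [count_zeros_in_array, zc] using PySem.List.foldl_count_if (fun x : Int => x == 0) xs 0

lemma fspPrefix_length (acc : Int) (xs : List Int) :
    (fspPrefix acc xs).length = xs.length + 1 := by
  induction xs generalizing acc with
  | nil => simp [fspPrefix]
  | cons x t ih => simp [fspPrefix, ih]

lemma fspPrefix_getElem (xs : List Int) (acc : Int) (k : Nat) (hk : k ≤ xs.length)
    (h : k < (fspPrefix acc xs).length) :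
    (fspPrefix acc xs)[k] = acc + (zc (xs.take k) : Int) := by
  induction xs generalizing acc k with
  | nil =>
    have hk0 : k = 0 := by simpa using hk
    subst hk0
    simp [fspPrefix, zc]
  | cons x t ih =>
    cases k with
    | zero => simp [fspPrefix, zc]
    | succ k =>
      have hk' : k ≤ t.length := by simpa using hk
      have h' : k < (fspPrefix (acc + (if x == 0 then 1 else 0)) t).length := by
        rw [fspPrefix_length]; omega
      simp only [fspPrefix, List.getElem_cons_succ]
      rw [ih _ _ hk' h']
      simp only [zc, List.take_succ_cons, List.countP_cons]
      by_cases hx : x = 0 <;> simp [hx] <;> ring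

-- pyGetD on the prefix list, for an index 0 ≤ i ≤ n
lemma prefix_lookup (activity : List Int) (i : Int) (h0 : 0 ≤ i)
    (h1 : i ≤ (activity.length : Int)) :
    PySem.List.pyGetD (fspPrefix 0 activity) i 0 = (zc (activity.take i.toNat) : Int) := by
  have hlt : i < ((fspPrefix 0 activity).length : Int) := by
    rw [fspPrefix_length]; push_cast; omega
  rw [PySem.List.pyGetD_eq_getElem _ _ h0 hlt,
    fspPrefix_getElem activity 0 i.toNat (by omega) (by rw [fspPrefix_length]; omega)]
  simp

-- the two loop-body predicates agree on every live window start 0 ≤ e < limit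
lemma pred_eq (activity : List Int) (req thr : Int) (e : Int) (h0 : 0 ≤ e)
    (h1 : e < min (activity.length : Int) ((activity.length : Int) - req)) :
    (decide (PySem.List.pyGetD
        (fspPrefix 0 (activity.take (max 0 (min (min (activity.length : Int) ((activity.length : Int) - req) + 59) (activity.length : Int))).toNat))
        (min (e + 60) (max 0 (min (min (activity.length : Int) ((activity.length : Int) - req) + 59) (activity.length : Int)))) 0 -
      PySem.List.pyGetD
        (fspPrefix 0 (activity.take (max 0 (min (min (activity.length : Int) ((activity.length : Int) - req) + 59) (activity.length : Int))).toNat))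
        e 0 < thr)) =
    (decide (count_zeros_in_array
        (PySem.List.slice activity (some e) (some (e + 60))) < thr)) := by
  set n : Int := (activity.length : Int) with hn
  set m : Int := max 0 (min (min n (n - req) + 59) n) with hm
  have hm0 : 0 ≤ m := le_max_left _ _
  have hmn : m ≤ n := by omega
  have hem : e < m := by omega
  have hMlen : ((activity.take m.toNat).length : Int) = m := by
    simp [List.length_take]; omega
  have lk : ∀ i : Int, 0 ≤ i → i ≤ m →
      PySem.List.pyGetD (fspPrefix 0 (activity.take m.toNat)) i 0 =
        (zc (activity.take i.toNat) : Int) := by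
    intro i hi0 him
    rw [prefix_lookup (activity.take m.toNat) i hi0 (by omega), List.take_take]
    have hmin : min i.toNat m.toNat = i.toNat := by omega
    rw [hmin]
  rw [lk e h0 (by omega), lk (min (e + 60) m) (by omega) (by omega)]
  rw [PySem.List.slice_toNat activity h0 (by omega), czia_eq]
  have hmin2 : (min (e + 60) m).toNat = min (e.toNat + 60) activity.length := by
    omega
  have htn : (e + 60).toNat = e.toNat + 60 := by omega
  rw [hmin2, htn]
  have hsplit : min (e.toNat + 60) activity.length =
      e.toNat + (min (e.toNat + 60) activity.length - e.toNat) := by omega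
  have h2 : zc (activity.take (min (e.toNat + 60) activity.length)) =
      zc (activity.take e.toNat) +
        zc (List.take (min (e.toNat + 60) activity.length - e.toNat) (activity.drop e.toNat)) := by
    conv_lhs => rw [hsplit]
    simp only [zc]
    rw [List.take_add, List.countP_append]
  have h3 : List.take (e.toNat + 60 - e.toNat) (activity.drop e.toNat) =
      List.take (min (e.toNat + 60) activity.length - e.toNat) (activity.drop e.toNat) := by
    rw [List.take_eq_take_iff]
    simp [List.length_drop]; omega
  rw [h3, h2, decide_eq_decide]
  push_cast
  omega

-- A's loop with break = foldl over the takeWhile prefix of the index list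
lemma loopA_eq_foldl (activity : List Int) (required thr : Int) (L : List Int) (s : Int) :
    fspLoopA activity required thr L s =
      List.foldl
        (fun s e => if count_zeros_in_array (PySem.List.slice activity (some e) (some (e + 60))) < thr then e else s)
        s (L.takeWhile (fun e => decide (required + e < (activity.length : Int)))) := by
  induction L generalizing s with
  | nil => simp [fspLoopA]
  | cons e rest ih =>
    by_cases h : required + e ≥ (activity.length : Int)
    · have : ¬ (required + e < (activity.length : Int)) := by omega
      simp [fspLoopA, h, this]
    · have h' : required + e < (activity.length : Int) := by omega
      simp only [fspLoopA, if_neg h, List.takeWhile_cons, h', decide_true]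
      exact ih _

-- "last hit" foldl = find? on the reversed list
lemma foldl_last (P : Int → Prop) [DecidablePred P] (L : List Int) (s : Int) :
    List.foldl (fun s e => if P e then e else s) s L =
      (L.reverse.find? (fun e => decide (P e))).getD s := by
  induction L generalizing s with
  | nil => simp
  | cons a L ih =>
    simp only [List.foldl_cons, List.reverse_cons, List.find?_append]
    rw [ih]
    cases h : L.reverse.find? (fun e => decide (P e)) with
    | some x => simp
    | none =>
      simp only [Option.none_or, Option.getD_none]
      by_cases hpa : P a <;> simp [List.find?, hpa]

-- B's early-return loop = find?
lemma loopB_eq_find (pre : List Int) (n thr : Int) (L : List Int) :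
    fspLoopB pre n thr L =
      ((L.find? (fun e => decide (PySem.List.pyGetD pre (min (e + 60) n) 0 - PySem.List.pyGetD pre e 0 < thr))).getD 0) := by
  induction L with
  | nil => simp [fspLoopB]
  | cons e rest ih =>
    by_cases h : PySem.List.pyGetD pre (min (e + 60) n) 0 - PySem.List.pyGetD pre e 0 < thr
    · simp [fspLoopB, h, List.find?]
    · simp [fspLoopB, h, List.find?, ih]

-- takeWhile (· < c) over an ascending range
lemma takeWhile_pyRange_aux (c b : Int) : ∀ (m : Nat) (a : Int), (b - a).toNat ≤ m →
    (PySem.List.pyRange a b 1).takeWhile (fun e => decide (e < c)) =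
      PySem.List.pyRange a (min b c) 1 := by
  intro m
  induction m with
  | zero =>
    intro a h
    rw [PySem.List.pyRange_one_eq_nil (by omega), PySem.List.pyRange_one_eq_nil (by omega)]
    simp
  | succ m ih =>
    intro a h
    by_cases hab : b ≤ a
    · rw [PySem.List.pyRange_one_eq_nil hab, PySem.List.pyRange_one_eq_nil (by omega)]
      simp
    · rw [not_le] at hab
      rw [PySem.List.pyRange_one_cons hab, List.takeWhile_cons]
      by_cases hc : a < c
      · simp only [hc, decide_true]
        rw [ih (a + 1) (by omega), ← PySem.List.pyRange_one_cons (show a < min b c by omega)]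
        simp
      · simp only [hc, decide_false]
        rw [PySem.List.pyRange_one_eq_nil (show min b c ≤ a by omega)]
        simp

lemma takeWhile_pyRange (a b c : Int) :
    (PySem.List.pyRange a b 1).takeWhile (fun e => decide (e < c)) =
      PySem.List.pyRange a (min b c) 1 :=
  takeWhile_pyRange_aux c b (b - a).toNat a le_rfl

-- reversing the ascending range gives the descending range
lemma reverse_pyRange (m : Int) :
    (PySem.List.pyRange 0 m 1).reverse = PySem.List.pyRange (m - 1) (-1) (-1) := by
  rw [PySem.List.pyRange_one, PySem.List.pyRange_neg_one]
  have hm : (m - 1 - (-1)).toNat = (m - 0).toNat := by omega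
  rw [hm]
  apply List.ext_getElem
  · simp
  · intro i h1 h2
    simp only [List.getElem_reverse, List.getElem_map, List.getElem_range]
    simp only [List.length_reverse, List.length_map, List.length_range] at h1 h2 ⊢
    omega

-- membership bounds in the descending range
lemma mem_range_bounds (limit e : Int) (h : e ∈ PySem.List.pyRange (limit - 1) (-1) (-1)) :
    0 ≤ e ∧ e < limit := by
  rw [PySem.List.pyRange_neg_one] at h
  simp only [List.mem_map, List.mem_range] at h
  obtain ⟨k, hk, rfl⟩ := h
  omega

lemma find?_congr_mem (L : List Int) (p q : Int → Bool) (h : ∀ x ∈ L, p x = q x) :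
    L.find? p = L.find? q := by
  induction L with
  | nil => rfl
  | cons a L ih =>
    have ha := h a (List.mem_cons_self ..)
    simp only [List.find?, ha]
    by_cases hq : q a <;> simp [hq, ih fun x hx => h x (List.mem_cons_of_mem _ hx)]

-- ===== VERDICT (by name: the statement is the Claim_ definition above) =====
theorem find_start_point_spec : Claim_equal_find_start_point := by
  intro activity study_period start_threshold _
  show find_start_point activity study_period start_threshold =
    find_start_point_alt activity study_period start_threshold
  have hA : find_start_point activity study_period start_threshold =
      fspLoopA activity (study_period * 24 * 60) start_threshold
        (PySem.List.pyRange 0 (activity.length : Int) 1) 0 := rfl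
  have hB : find_start_point_alt activity study_period start_threshold =
      fspLoopB
        (fspPrefix 0 (PySem.List.slice activity none
          (some (max 0 (min (min (activity.length : Int) ((activity.length : Int) - study_period * 24 * 60) + 59) (activity.length : Int))))))
        (max 0 (min (min (activity.length : Int) ((activity.length : Int) - study_period * 24 * 60) + 59) (activity.length : Int)))
        start_threshold
        (PySem.List.pyRange
          (min (activity.length : Int) ((activity.length : Int) - study_period * 24 * 60) - 1)
          (-1) (-1)) := rfl
  rw [hA, hB, PySem.List.slice_to activity (le_max_left _ _), loopA_eq_foldl, loopB_eq_find]
  have hpred : (fun e : Int => decide (study_period * 24 * 60 + e < (activity.length : Int))) =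
      (fun e : Int => decide (e < (activity.length : Int) - study_period * 24 * 60)) := by
    funext e
    rw [decide_eq_decide]
    omega
  rw [hpred, takeWhile_pyRange,
    foldl_last (fun e => count_zeros_in_array
      (PySem.List.slice activity (some e) (some (e + 60))) < start_threshold),
    reverse_pyRange]
  congr 1
  apply find?_congr_mem
  intro e he
  obtain ⟨h0, h1⟩ := mem_range_bounds _ _ he
  exact (pred_eq activity (study_period * 24 * 60) start_threshold e h0 (by omega)).symm
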